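-- pv_equiv track=rewrite | github.com/Alexander-Jing/SRTP--clothes | camera_raspberry.py | max_choose_1
-- ===== SOURCE A (Python) =====
-- def max_choose_1(contours):
--     for i in range(len(contours)):
--         for j in range(len(contours) - i -1):
--             if(len(contours[j]) > len(contours[j + 1])):
--                 t = contours[j]
--                 contours[j] = contours[j + 1]
--                 contours[j + 1] = t
--     return contours[len(contours)-2]
-- ===== SOURCE B (Python) =====
-- def max_choose_1(contours):
--     # Stable insertion sort into a fresh list keyed by len (does not mutate
--     # the argument, unlike A which sorts it in place); same return value.
--     res = []
--     for x in contours: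
--         i = 0
--         while i < len(res) and len(res[i]) <= len(x):
--             i += 1
--         res.insert(i, x)
--     return res[len(contours) - 2]
-- ===== Notes on version B (the rewrite author's own statement) =====
-- stated objective: alternative
-- what changed: Replaces the in-place indexed bubble sort (n^2 adjacent-swap passes over the mutated argument) with a stable insertion sort that builds a fresh sorted list, then returns its second-to-last element; A mutates the argument, B does not (return values agree).
import Mathlib
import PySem

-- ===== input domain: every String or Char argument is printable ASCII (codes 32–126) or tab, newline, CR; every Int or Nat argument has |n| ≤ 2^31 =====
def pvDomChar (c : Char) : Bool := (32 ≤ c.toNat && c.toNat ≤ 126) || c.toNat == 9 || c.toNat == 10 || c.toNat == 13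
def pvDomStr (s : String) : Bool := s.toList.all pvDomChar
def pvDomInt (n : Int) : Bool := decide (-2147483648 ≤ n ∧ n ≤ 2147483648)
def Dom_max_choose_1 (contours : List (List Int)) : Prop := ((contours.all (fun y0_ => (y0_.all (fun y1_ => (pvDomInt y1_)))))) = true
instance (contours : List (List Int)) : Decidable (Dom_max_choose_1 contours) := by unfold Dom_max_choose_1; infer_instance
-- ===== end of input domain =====

-- B replaces A's in-place bubble sort by a stable insertion sort into a fresh list (alternative
-- algorithm, same cost class); A sorts its argument in place, B does not mutate it — the
-- equivalence proved here is about the RETURN value only.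

-- ===== PORT A =====
-- one inner-loop body: if len(c[j]) > len(c[j+1]): swap c[j], c[j+1]  (j, j+1 always in range)
def pvBubbleStep (c : List (List Int)) (j : Nat) : List (List Int) :=
  let a := c.getD j []
  let b := c.getD (j + 1) []
  if a.length > b.length then (c.set j b).set (j + 1) a else c

def max_choose_1 (contours : List (List Int)) : List Int :=
  (PySem.List.pyGet?
      ((List.range contours.length).foldl
        (fun c i => (List.range (contours.length - i - 1)).foldl pvBubbleStep c) contours)
      ((contours.length : Int) - 2)).getD []    -- contours[len(contours)-2]; none = IndexError, excluded by Pre_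

-- ===== PORT B =====
-- res.insert at the first position whose element is strictly longer = PySem.List.insertBy
def max_choose_1_alt (contours : List (List Int)) : List Int :=
  (PySem.List.pyGet?
      (contours.foldl (fun acc x => PySem.List.insertBy (fun a b => decide (a.length < b.length)) x acc) [])
      ((contours.length : Int) - 2)).getD []

-- ===== PRECONDITION & SPEC =====
-- Pre_ excludes only the empty list, on which both Pythons raise IndexError at the final indexing.
def Pre_max_choose_1 (contours : List (List Int)) : Prop := contours ≠ []
instance (contours : List (List Int)) : Decidable (Pre_max_choose_1 contours) := by unfold Pre_max_choose_1; infer_instance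
def pvWitness_max_choose_1 : List (List Int) := [[1], [2, 3]]

def Spec_max_choose_1 (contours : List (List Int)) (out : List Int) : Prop := out = max_choose_1_alt contours
instance (contours : List (List Int)) (out : List Int) : Decidable (Spec_max_choose_1 contours out) := by unfold Spec_max_choose_1; infer_instance

-- ===== CLAIM (what is proved, stated in full; the proofs are below) =====
def Claim_equal_max_choose_1 : Prop := ∀ (contours : List (List Int)), Dom_max_choose_1 contours → Pre_max_choose_1 contours → Spec_max_choose_1 contours (max_choose_1 contours)

-- ===== LEMMAS AND PROOFS =====

-- structural description of one full bubble pass over a prefix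
def pvPass : List (List Int) → List (List Int)
  | a :: b :: t => if a.length > b.length then b :: pvPass (a :: t) else a :: pvPass (b :: t)
  | l => l
termination_by l => l.length
decreasing_by all_goals simp

theorem pvPass_length (l : List (List Int)) : (pvPass l).length = l.length := by
  induction l using pvPass.induct with
  | case1 a b t h ih => simp [pvPass, h, ih]
  | case2 a b t h ih => simp [pvPass, h, ih]
  | case3 l h => cases l with
    | nil => simp [pvPass]
    | cons a t => cases t with
      | nil => simp [pvPass]
      | cons b t' => exact absurd rfl (h a b t')

theorem pvPass_perm (l : List (List Int)) : (pvPass l).Perm l := by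
  induction l using pvPass.induct with
  | case1 a b t h ih =>
      simp only [pvPass, h, if_pos]
      exact ((ih.cons b).trans (List.Perm.swap a b t))
  | case2 a b t h ih =>
      simp only [pvPass, h, ite_false]
      exact ih.cons a
  | case3 l h => cases l with
    | nil => simp [pvPass]
    | cons a t => cases t with
      | nil => simp [pvPass]
      | cons b t' => exact absurd rfl (h a b t')

-- inserting two elements commutes when the second is strictly shorter (stability of insertBy)
theorem pvInsertBy_comm (acc : List (List Int)) (a b : List Int) (h : b.length < a.length) :
    PySem.List.insertBy (fun u v => decide (u.length < v.length)) a
      (PySem.List.insertBy (fun u v => decide (u.length < v.length)) b acc)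
    = PySem.List.insertBy (fun u v => decide (u.length < v.length)) b
      (PySem.List.insertBy (fun u v => decide (u.length < v.length)) a acc) := by
  induction acc with
  | nil =>
      simp only [PySem.List.insertBy]
      rw [if_neg (by simp; omega), if_pos (by simp [h])]
  | cons y ys ih =>
      by_cases h1 : b.length < y.length
      · by_cases h3 : a.length < y.length <;>
          simp [PySem.List.insertBy, h1, h3, show ¬ a.length < b.length by omega, h]
      · have h3 : ¬ a.length < y.length := by omega
        simp [PySem.List.insertBy, h1, h3, ih]

-- a bubble pass does not change the insertion-sort accumulator result
theorem pvPass_foldl_ins (l : List (List Int)) : ∀ acc : List (List Int),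
    (pvPass l).foldl (fun acc x => PySem.List.insertBy (fun u v => decide (u.length < v.length)) x acc) acc
    = l.foldl (fun acc x => PySem.List.insertBy (fun u v => decide (u.length < v.length)) x acc) acc := by
  induction l using pvPass.induct with
  | case1 a b t h ih =>
      intro acc
      simp only [pvPass, h, if_pos, List.foldl_cons]
      rw [ih]
      simp only [List.foldl_cons]
      rw [pvInsertBy_comm _ _ _ h]
  | case2 a b t h ih =>
      intro acc
      simp only [pvPass, h, ite_false, List.foldl_cons]
      rw [ih]
      rfl
  | case3 l h => intro acc; cases l with
    | nil => simp [pvPass]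
    | cons a t => cases t with
      | nil => simp [pvPass]
      | cons b t' => exact absurd rfl (h a b t')

-- appending one element to a pass input: the element either swaps with the running max or not
theorem pvPass_snoc (l : List (List Int)) : ∀ (q : List (List Int)) (m x : List Int),
    pvPass l = q ++ [m] →
    pvPass (l ++ [x]) = if x.length < m.length then q ++ [x, m] else q ++ [m, x] := by
  induction l using pvPass.induct with
  | case1 a b t h ih =>
      intro q m x hq
      have hne : pvPass (a :: t) ≠ [] := by
        intro hc
        have := pvPass_length (a :: t)
        rw [hc] at this; simp at this
      rw [pvPass, if_pos h] at hq
      cases q with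
      | nil =>
          exfalso
          simp at hq
          exact hne hq.2
      | cons q0 q1 =>
          simp only [List.cons_append, List.cons.injEq] at hq
          obtain ⟨heq, hq1⟩ := hq
          subst heq
          have step : pvPass ((a :: b :: t) ++ [x]) = b :: pvPass (a :: (t ++ [x])) := by
            simp only [List.cons_append]
            rw [pvPass, if_pos h]
          have ihx := ih q1 m x hq1
          rw [List.cons_append] at ihx
          rw [step, ihx]
          split <;> simp
  | case2 a b t h ih =>
      intro q m x hq
      have hne : pvPass (b :: t) ≠ [] := by
        intro hc
        have := pvPass_length (b :: t)
        rw [hc] at this; simp at this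
      rw [pvPass, if_neg h] at hq
      cases q with
      | nil =>
          exfalso
          simp at hq
          exact hne hq.2
      | cons q0 q1 =>
          simp only [List.cons_append, List.cons.injEq] at hq
          obtain ⟨heq, hq1⟩ := hq
          subst heq
          have step : pvPass ((a :: b :: t) ++ [x]) = a :: pvPass (b :: (t ++ [x])) := by
            simp only [List.cons_append]
            rw [pvPass, if_neg h]
          have ihx := ih q1 m x hq1
          rw [List.cons_append] at ihx
          rw [step, ihx]
          split <;> simp
  | case3 l h =>
      intro q m x hq
      cases l with
      | nil => simp [pvPass] at hq
      | cons c0 t =>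
          cases t with
          | nil =>
              have h1 : pvPass [c0] = [c0] := by simp [pvPass]
              rw [h1] at hq
              have hq' : q = [] ∧ c0 = m := by
                cases q with
                | nil => simpa using hq
                | cons u us =>
                    exfalso
                    have hlen := congrArg List.length hq
                    simp only [List.length_cons, List.length_append, List.length_nil] at hlen
                    omega
              obtain ⟨rfl, rfl⟩ := hq'
              have e : pvPass [c0, x] = if c0.length > x.length then [x, c0] else [c0, x] := by
                rw [pvPass]; split <;> simp [pvPass]
              show pvPass [c0, x] = _
              rw [e]
              by_cases hx : x.length < c0.length
              · rw [if_pos (by omega), if_pos hx]; simp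
              · rw [if_neg (by omega), if_neg hx]; simp
          | cons b t' => exact absurd rfl (h c0 b t')

-- helpers for list surgery at a known position
theorem pv_set_append {α : Type} (q : List α) (x : α) (r : List α) (v : α) :
    (q ++ x :: r).set q.length v = q ++ v :: r := by
  induction q with
  | nil => rfl
  | cons h t ih => simp [ih]

theorem pv_getD_append {α : Type} [Inhabited α] (q : List α) (x : α) (r : List α) (d : α) :
    (q ++ x :: r).getD q.length d = x := by
  induction q with
  | nil => rfl
  | cons h t ih => simp [ih]

-- the inner loop up to bound m equals a structural pass over the first m+1 elements
theorem pv_inner_char (cs : List (List Int)) : ∀ m : Nat, m < cs.length →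
    ∃ q a, pvPass (cs.take (m+1)) = q ++ [a] ∧ q.length = m ∧
      (List.range m).foldl pvBubbleStep cs = q ++ a :: cs.drop (m+1) ∧
      ∀ x ∈ cs.take (m+1), x.length ≤ a.length := by
  intro m
  induction m with
  | zero =>
      intro hm
      cases cs with
      | nil => simp at hm
      | cons h t =>
          refine ⟨[], h, ?_, rfl, ?_, ?_⟩
          · simp [pvPass]
          · simp
          · intro x hx; simp at hx; simp [hx]
  | succ m ih =>
      intro hm
      obtain ⟨q, a, h1, h2, h3, h4⟩ := ih (by omega)
      have hb : cs.drop (m+1) = (cs[m+1]'hm) :: cs.drop (m+2) := List.drop_eq_getElem_cons hm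
      have htake : cs.take (m+2) = cs.take (m+1) ++ [(cs[m+1]'hm)] := by
        rw [List.take_add_one, List.getElem?_eq_getElem hm]
        rfl
      set b := (cs[m+1]'hm) with hbdef
      have hfold : (List.range (m+1)).foldl pvBubbleStep cs
          = pvBubbleStep ((List.range m).foldl pvBubbleStep cs) m := by
        rw [List.range_succ, List.foldl_append]
        rfl
      rw [h3, hb] at hfold
      have hga : (q ++ a :: b :: cs.drop (m+2)).getD m [] = a := by
        rw [← h2]; exact pv_getD_append q a _ []
      have hgb : (q ++ a :: b :: cs.drop (m+2)).getD (m+1) [] = b := by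
        have : q ++ a :: b :: cs.drop (m+2) = (q ++ [a]) ++ b :: cs.drop (m+2) := by simp
        rw [this, ← show (q ++ [a]).length = m + 1 by simp [h2]]
        exact pv_getD_append _ b _ []
      by_cases hc : a.length > b.length
      · -- swap case
        refine ⟨q ++ [b], a, ?_, by simp [h2], ?_, ?_⟩
        · rw [htake, pvPass_snoc _ q a b h1, if_pos hc]
          simp
        · rw [hfold]
          unfold pvBubbleStep
          simp only [hga, hgb, if_pos hc]
          have s1 : (q ++ a :: b :: cs.drop (m+2)).set m b = q ++ b :: b :: cs.drop (m+2) := by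
            rw [← h2]; exact pv_set_append q a _ b
          rw [s1]
          have s2 : (q ++ b :: b :: cs.drop (m+2)).set (m+1) a
              = q ++ b :: a :: cs.drop (m+2) := by
            have e1 : q ++ b :: b :: cs.drop (m+2) = (q ++ [b]) ++ b :: cs.drop (m+2) := by simp
            have e2 : q ++ b :: a :: cs.drop (m+2) = (q ++ [b]) ++ a :: cs.drop (m+2) := by simp
            rw [e1, e2, ← show (q ++ [b]).length = m + 1 by simp [h2]]
            exact pv_set_append _ b _ a
          rw [s2]
          simp
        · intro x hx
          rw [htake] at hx
          rcases List.mem_append.mp hx with hx | hx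
          · exact h4 x hx
          · simp at hx; subst hx; omega
      · -- no swap
        refine ⟨q ++ [a], b, ?_, by simp [h2], ?_, ?_⟩
        · rw [htake, pvPass_snoc _ q a b h1, if_neg (by omega)]
          simp
        · rw [hfold]
          unfold pvBubbleStep
          simp only [hga, hgb, if_neg hc]
          simp
        · intro x hx
          rw [htake] at hx
          rcases List.mem_append.mp hx with hx | hx
          · have := h4 x hx; omega
          · simp at hx; subst hx; omega

-- the outer-loop invariant: length preserved, stable-sort value preserved, sorted suffix grows
theorem pv_outer_inv (c0 : List (List Int)) : ∀ i : Nat, i ≤ c0.length →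
    ∀ s, s = (List.range i).foldl
        (fun c i => (List.range (c0.length - i - 1)).foldl pvBubbleStep c) c0 →
      s.length = c0.length ∧
      PySem.List.sorted s (fun x => x.length) false = PySem.List.sorted c0 (fun x => x.length) false ∧
      (s.drop (c0.length - i)).Pairwise (fun a b => a.length ≤ b.length) ∧
      ∀ x ∈ s.take (c0.length - i), ∀ y ∈ s.drop (c0.length - i), x.length ≤ y.length := by
  intro i
  induction i with
  | zero =>
      intro _ s hs
      subst hs
      refine ⟨rfl, rfl, ?_, ?_⟩
      · simp
      · intro x _ y hy; simp at hy
  | succ i ih =>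
      intro hi s hs
      obtain ⟨l1, l2, l3, l4⟩ := ih (by omega) _ rfl
      set sp := (List.range i).foldl
        (fun c i => (List.range (c0.length - i - 1)).foldl pvBubbleStep c) c0 with hsp
      have hstep : s = (List.range (c0.length - i - 1)).foldl pvBubbleStep sp := by
        rw [hs, List.range_succ, List.foldl_append]
        rfl
      have hmlt : c0.length - i - 1 < sp.length := by omega
      obtain ⟨q, a, h1, h2, h3, h4⟩ := pv_inner_char sp (c0.length - i - 1) hmlt
      have hm1 : c0.length - i - 1 + 1 = c0.length - i := by omega
      rw [hm1] at h1 h3 h4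
      rw [h3] at hstep
      -- decompose: s = q ++ a :: (suffix of sp)
      have hsuf : s.drop (c0.length - (i+1)) = a :: sp.drop (c0.length - i) := by
        rw [hstep]
        have : c0.length - (i+1) = q.length := by omega
        rw [this, List.drop_left]
      have hpre : s.take (c0.length - (i+1)) = q := by
        rw [hstep]
        have : c0.length - (i+1) = q.length := by omega
        rw [this, List.take_left]
      have hamem : a ∈ sp.take (c0.length - i) := by
        have : a ∈ pvPass (sp.take (c0.length - i)) := by rw [h1]; simp
        exact (pvPass_perm _).mem_iff.mp this
      refine ⟨?_, ?_, ?_, ?_⟩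
      · -- length
        rw [hstep]
        have ht := congrArg List.length (List.take_append_drop (c0.length - i) sp)
        have hl := pvPass_length (sp.take (c0.length - i))
        rw [h1] at hl
        simp only [List.length_append, List.length_cons, List.length_nil] at ht hl ⊢
        omega
      · -- sorted value preserved
        have key : PySem.List.sorted s (fun x => x.length) false
            = PySem.List.sorted sp (fun x => x.length) false := by
          rw [PySem.List.sorted_eq_foldl_insertBy, PySem.List.sorted_eq_foldl_insertBy]
          conv_rhs => rw [← List.take_append_drop (c0.length - i) sp]
          rw [hstep]
          have e : q ++ a :: sp.drop (c0.length - i)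
              = (q ++ [a]) ++ sp.drop (c0.length - i) := by simp
          rw [e, ← h1, List.foldl_append, List.foldl_append, pvPass_foldl_ins]
        rw [key, l2]
      · -- suffix pairwise
        rw [hsuf]
        exact List.Pairwise.cons (fun y hy => l4 a hamem y hy) l3
      · -- cross property
        intro x hx y hy
        rw [hpre] at hx
        rw [hsuf] at hy
        have hxmem : x ∈ sp.take (c0.length - i) := by
          have : x ∈ pvPass (sp.take (c0.length - i)) := by rw [h1]; simp [hx]
          exact (pvPass_perm _).mem_iff.mp this
        rcases List.mem_cons.mp hy with rfl | hy
        · exact h4 x hxmem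
        · exact l4 x hxmem y hy

-- the bubble sort computes the stable sort by length
theorem pv_bubble_eq_sorted (c0 : List (List Int)) :
    (List.range c0.length).foldl
        (fun c i => (List.range (c0.length - i - 1)).foldl pvBubbleStep c) c0
      = PySem.List.sorted c0 (fun x => x.length) false := by
  obtain ⟨_, l2, l3, _⟩ := pv_outer_inv c0 c0.length le_rfl _ rfl
  set s := (List.range c0.length).foldl
    (fun c i => (List.range (c0.length - i - 1)).foldl pvBubbleStep c) c0 with hs
  have hdrop : s.drop (c0.length - c0.length) = s := by simp
  rw [hdrop] at l3
  have : PySem.List.sorted s (fun x => x.length) false = s :=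
    PySem.List.sorted_eq_self_of_pairwise s _ l3
  rw [← this, l2]

-- ===== VERDICT (by name: the statement is the Claim_ definition above) =====
theorem max_choose_1_spec : Claim_equal_max_choose_1 := by
  intro contours _ _
  show max_choose_1 contours = max_choose_1_alt contours
  unfold max_choose_1 max_choose_1_alt
  rw [pv_bubble_eq_sorted, PySem.List.sorted_eq_foldl_insertBy]
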